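-- pv_equiv track=rewrite | github.com/aws-neuron/transformers-neuronx | src/transformers_neuronx/utils.py | build_replica_groups
-- ===== SOURCE A (Python) =====
-- def build_replica_groups(num_groups, group_size, interleave=False):
--     """
--     Construct replica_groups to handle "intra-group" reduce operations.
--
--     Each nested list represents the ids of the cores within the same group.
--
--     Examples:
--
--         group_size = 2
--         num_groups = 3
--         replica_groups = [[0, 1], [2, 3], [4, 5]]
--
--         group_size = 3
--         num_groups = 2
--         replica_groups = [[0, 1, 2], [3, 4, 5]]
--     """
--     if interleave:
--         limit = num_groups*group_size
--         ncs = list(range(limit))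
--         slices = [slice(i, limit, num_groups) for i in range(num_groups)]
--         replica_groups = [ncs[s] for s in slices]
--     else:
--         replica_groups = [
--             [nc for nc in range(group_size * group, group_size * group + group_size)]
--             for group in range(num_groups)
--         ]
--     return replica_groups
-- ===== SOURCE B (Python) =====
-- def build_replica_groups(num_groups, group_size, interleave=False):
--     out = []
--     for g in range(num_groups):
--         start, step = (g, num_groups) if interleave else (g * group_size, 1)
--         out.append([start + step * k for k in range(group_size)])
--     return out
-- ===== Notes on version B (the rewrite author's own statement) =====
-- stated objective: simpler
-- what changed: Replaces materializing list(range(limit)) plus per-group slice objects (and the separate non-interleave comprehension) with one direct start+step*k index formula per group, merging both branches into a single loop.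
import Mathlib
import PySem

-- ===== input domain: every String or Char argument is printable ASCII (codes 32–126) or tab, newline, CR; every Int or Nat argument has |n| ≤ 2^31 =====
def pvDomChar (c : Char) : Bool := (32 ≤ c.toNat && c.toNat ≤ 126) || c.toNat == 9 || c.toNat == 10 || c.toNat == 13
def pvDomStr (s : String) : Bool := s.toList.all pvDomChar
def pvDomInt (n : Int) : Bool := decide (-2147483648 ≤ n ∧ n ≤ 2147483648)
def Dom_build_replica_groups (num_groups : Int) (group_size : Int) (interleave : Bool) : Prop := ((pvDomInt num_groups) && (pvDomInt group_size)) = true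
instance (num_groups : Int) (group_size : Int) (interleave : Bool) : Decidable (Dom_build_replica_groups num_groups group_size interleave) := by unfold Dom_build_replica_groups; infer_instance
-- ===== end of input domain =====

-- B merges A's two branches into one start/step index formula per group, removing the ncs list and slice objects (objective: simpler).


-- ===== PORT A =====
def build_replica_groups (num_groups : Int) (group_size : Int) (interleave : Bool) : List (List Int) :=
  if interleave then
    let limit := num_groups * group_size
    let ncs := PySem.List.pyRange 0 limit 1
    let slices := (PySem.List.pyRange 0 num_groups 1).map
      (fun i => (some i, some limit, num_groups))
    -- `.getD []` only makes the slice total; step = num_groups ≠ 0 whenever a slice exists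
    slices.map (fun s => (PySem.List.slice? ncs s.1 s.2.1 s.2.2).getD [])
  else
    (PySem.List.pyRange 0 num_groups 1).map (fun group =>
      PySem.List.pyRange (group_size * group) (group_size * group + group_size) 1)

-- ===== PORT B =====
def build_replica_groups_alt (num_groups : Int) (group_size : Int) (interleave : Bool) : List (List Int) :=
  (PySem.List.pyRange 0 num_groups 1).map (fun g =>
    let sp := if interleave then (g, num_groups) else (g * group_size, 1)
    (PySem.List.pyRange 0 group_size 1).map (fun k => sp.1 + sp.2 * k))

-- ===== PRECONDITION & SPEC =====
def Spec_build_replica_groups (num_groups : Int) (group_size : Int) (interleave : Bool) (out : List (List Int)) : Prop := out = build_replica_groups_alt num_groups group_size interleave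
instance (num_groups : Int) (group_size : Int) (interleave : Bool) (out : List (List Int)) : Decidable (Spec_build_replica_groups num_groups group_size interleave out) := by unfold Spec_build_replica_groups; infer_instance

-- ===== CLAIM (what is proved, stated in full; the proofs are below) =====
def Claim_equal_build_replica_groups : Prop := ∀ (num_groups : Int) (group_size : Int) (interleave : Bool), Dom_build_replica_groups num_groups group_size interleave → Spec_build_replica_groups num_groups group_size interleave (build_replica_groups num_groups group_size interleave)

-- ===== LEMMAS AND PROOFS =====

-- any unit-step range is the shifted image of range(group_size)
lemma pyRange_shift (a gs : Int) :
    PySem.List.pyRange a (a + gs) 1 = (PySem.List.pyRange 0 gs 1).map (fun k => a + 1 * k) := by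
  rw [PySem.List.pyRange_of_pos a (a + gs) one_pos, PySem.List.pyRange_of_pos 0 gs one_pos,
    List.map_map]
  have hc : (a < a + gs) = (0 < gs) := by simp
  simp only [hc]
  split_ifs with h
  · have hc2 : a + gs - a + 1 - 1 = gs - 0 + 1 - 1 := by ring
    rw [hc2]
    apply List.map_congr_left
    intro k _
    simp
  · simp

-- a stride-num_groups slice of range(num_groups*group_size) is the arithmetic progression
lemma slice_stride (ng gs i : Int) (hng : 0 < ng) (hi0 : 0 ≤ i) (hi : i < ng) :
    PySem.List.slice? (PySem.List.pyRange 0 (ng * gs) 1) (some i) (some (ng * gs)) ng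
      = some ((PySem.List.pyRange 0 gs 1).map (fun k => i + ng * k)) := by
  have hlen : (PySem.List.pyRange 0 (ng*gs) 1).length = (ng*gs).toNat := by
    simp [PySem.List.length_pyRange_one]
  unfold PySem.List.slice? PySem.List.sliceIndices
  rw [if_neg (by omega), hlen]
  simp only [if_neg (by omega : ¬ ng < 0), if_neg (by omega : ¬ i < 0)]
  rcases le_or_gt gs 0 with hgs | hgs
  · have h1 : ng * gs ≤ 0 := by nlinarith
    have h2 : (ng*gs).toNat = 0 := Int.toNat_of_nonpos h1
    rw [PySem.List.pyRange_one_eq_nil hgs]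
    simp only [h2, Nat.cast_zero]
    have hstart : min i (0:Int) = 0 := by omega
    simp only [hstart]
    split_ifs <;> simp_all
  · have hpos : 0 < ng * gs := mul_pos hng hgs
    have h2 : ((ng*gs).toNat : Int) = ng*gs := Int.toNat_of_nonneg (le_of_lt hpos)
    have hile : i < ng*gs := lt_of_lt_of_le hi (by nlinarith)
    rw [h2]
    simp only [if_neg (by omega : ¬ ng*gs < 0), min_self,
      min_eq_left (le_of_lt hile), if_pos hng, if_pos hile]
    have hcount : ((ng*gs - i + ng - 1) / ng).toNat = gs.toNat := by
      have : ng*gs - i + ng - 1 = (ng - 1 - i) + gs * ng := by ring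
      rw [this, Int.add_mul_ediv_right _ _ (by omega : ng ≠ 0),
        Int.ediv_eq_zero_of_lt (by omega) (by omega)]
      simp
    rw [hcount]
    have hf : ∀ x ∈ List.range gs.toNat,
        (PySem.List.pyRange 0 (ng*gs) 1)[(i + ng * (x:Int)).toNat]?
          = (some ∘ (fun x : Nat => i + ng * (x:Int))) x := by
      intro x hx
      rw [List.mem_range] at hx
      have hxlt : (x:Int) < gs := by omega
      have hidx : i + ng * (x:Int) < ng * gs := by nlinarith
      have hnn : 0 ≤ i + ng * (x:Int) := by positivity
      rw [PySem.List.getElem?_pyRange_one]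
      rw [if_pos (by omega)]
      simp [Int.toNat_of_nonneg hnn]
    rw [List.filterMap_congr hf, List.filterMap_eq_map,
      PySem.List.pyRange_of_pos 0 gs one_pos, if_pos (by omega : (0:Int) < gs), List.map_map]
    have hc : (gs - 0 + 1 - 1) / 1 = gs := by omega
    rw [hc]
    congr 1
    apply List.map_congr_left
    intro k _
    simp


theorem build_replica_groups_spec : Claim_equal_build_replica_groups := by
  intro ng gs il _
  unfold Spec_build_replica_groups build_replica_groups build_replica_groups_alt
  cases il with
  | false =>
      simp only [if_neg (by decide : ¬ (false = true))]
      apply List.map_congr_left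
      intro g _
      have := pyRange_shift (gs * g) gs
      simpa [mul_comm] using this
  | true =>
      simp only [List.map_map]
      apply List.map_congr_left
      intro i hi
      rw [PySem.List.mem_pyRange_one] at hi
      have hng : 0 < ng := lt_of_le_of_lt hi.1 hi.2
      simp [Function.comp, slice_stride ng gs i hng hi.1 hi.2]
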